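-- pv_equiv track=rewrite | github.com/Vexus1/advent_of_code | 2023/day02.py | find_min_values
-- ===== SOURCE A (Python) =====
-- def find_min_values(colors_list: list[list[str]],
--                     numbers_list: list[list[int]]) -> int:
--     min_red = 0
--     min_green = 0
--     min_blue = 0
--     for i, color in enumerate(colors_list):
--         for j in range(len(color)):
--             if color[j] == 'red':
--                 min_red = max(min_red, numbers_list[i][j])
--             elif color[j] == 'green':
--                 min_green = max(min_green, numbers_list[i][j])
--             elif color[j] == 'blue':
--                 min_blue = max(min_blue, numbers_list[i][j])
--     min_value = min_red * min_green * min_blue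
--     return min_value
-- ===== SOURCE B (Python) =====
-- def find_min_values(colors_list: list[list[str]],
--                     numbers_list: list[list[int]]) -> int:
--     def best(target: str) -> int:
--         return max([0] + [numbers_list[i][j]
--                           for i, color in enumerate(colors_list)
--                           for j in range(len(color))
--                           if color[j] == target])
--     return best('red') * best('green') * best('blue')
-- ===== Notes on version B (the rewrite author's own statement) =====
-- stated objective: simpler
-- what changed: Replaces A's single interleaved loop carrying three running-max accumulators by three independent per-color passes, each a filtered comprehension reduced with one max([0]+...) call.
import Mathlib
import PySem

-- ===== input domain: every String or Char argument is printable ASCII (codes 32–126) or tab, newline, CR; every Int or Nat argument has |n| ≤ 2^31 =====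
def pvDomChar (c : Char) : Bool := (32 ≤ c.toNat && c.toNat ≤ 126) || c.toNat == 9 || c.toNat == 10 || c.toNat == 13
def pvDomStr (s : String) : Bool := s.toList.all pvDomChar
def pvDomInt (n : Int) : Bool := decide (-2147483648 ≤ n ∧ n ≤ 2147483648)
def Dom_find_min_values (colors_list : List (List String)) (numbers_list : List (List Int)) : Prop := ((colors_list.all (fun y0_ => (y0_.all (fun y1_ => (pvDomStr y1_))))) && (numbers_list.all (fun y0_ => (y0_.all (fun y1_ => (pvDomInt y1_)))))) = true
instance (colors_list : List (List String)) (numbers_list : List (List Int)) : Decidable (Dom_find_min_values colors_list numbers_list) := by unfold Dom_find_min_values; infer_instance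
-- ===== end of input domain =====

-- B replaces A's single interleaved loop with three accumulators by three independent per-color filtered passes, each reduced with one max call (objective: simpler).


-- ===== PORT A =====
def find_min_values (colors_list : List (List String)) (numbers_list : List (List Int)) : Int :=
  let st := (PySem.List.enumerate colors_list).foldl (fun (st : Int × Int × Int) p =>
    (PySem.List.pyRange 0 (p.2.length : Int) 1).foldl (fun (st : Int × Int × Int) j =>
      if PySem.List.pyGetD p.2 j "" = "red" then
        (max st.1 (PySem.List.pyGetD (PySem.List.pyGetD numbers_list p.1 []) j 0), st.2.1, st.2.2)
      else if PySem.List.pyGetD p.2 j "" = "green" then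
        (st.1, max st.2.1 (PySem.List.pyGetD (PySem.List.pyGetD numbers_list p.1 []) j 0), st.2.2)
      else if PySem.List.pyGetD p.2 j "" = "blue" then
        (st.1, st.2.1, max st.2.2 (PySem.List.pyGetD (PySem.List.pyGetD numbers_list p.1 []) j 0))
      else st) st) ((0 : Int), (0 : Int), (0 : Int))
  st.1 * st.2.1 * st.2.2

-- ===== PORT B =====
-- the filtered comprehension of Source B's `best(target)` (values of `target`-colored entries)
def pvVals (target : String) (colors_list : List (List String)) (numbers_list : List (List Int)) : List Int :=
  (PySem.List.enumerate colors_list).flatMap (fun p =>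
    (PySem.List.pyRange 0 (p.2.length : Int) 1).filterMap (fun j =>
      if PySem.List.pyGetD p.2 j "" = target then
        some (PySem.List.pyGetD (PySem.List.pyGetD numbers_list p.1 []) j 0)
      else none))

def find_min_values_alt (colors_list : List (List String)) (numbers_list : List (List Int)) : Int :=
  let best := fun (target : String) =>
    (PySem.List.max? ((0 : Int) :: pvVals target colors_list numbers_list) (fun y => y)).getD 0
  best "red" * best "green" * best "blue"

-- ===== PRECONDITION & SPEC =====
-- Pre_ excludes exactly the inputs on which A raises IndexError: a 'red'/'green'/'blue' entry
-- at position (i,j) of colors_list with no corresponding entry numbers_list[i][j].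
def Pre_find_min_values (colors_list : List (List String)) (numbers_list : List (List Int)) : Prop :=
  ∀ i < colors_list.length, ∀ j < (colors_list.getD i []).length,
    (colors_list.getD i []).getD j "" ∈ (["red", "green", "blue"] : List String) →
      i < numbers_list.length ∧ j < (numbers_list.getD i []).length
instance (colors_list : List (List String)) (numbers_list : List (List Int)) : Decidable (Pre_find_min_values colors_list numbers_list) := by unfold Pre_find_min_values; infer_instance
def pvWitness_find_min_values : List (List String) × List (List Int) := ([["red", "blue"], ["green"]], [[3, 4], [2]])
def Spec_find_min_values (colors_list : List (List String)) (numbers_list : List (List Int)) (out : Int) : Prop := out = find_min_values_alt colors_list numbers_list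
instance (colors_list : List (List String)) (numbers_list : List (List Int)) (out : Int) : Decidable (Spec_find_min_values colors_list numbers_list out) := by unfold Spec_find_min_values; infer_instance

-- ===== CLAIM (what is proved, stated in full; the proofs are below) =====
def Claim_equal_find_min_values : Prop := ∀ (colors_list : List (List String)) (numbers_list : List (List Int)), Dom_find_min_values colors_list numbers_list → Pre_find_min_values colors_list numbers_list → Spec_find_min_values colors_list numbers_list (find_min_values colors_list numbers_list)

-- ===== LEMMAS AND PROOFS =====

-- One inner step of A over an arbitrary index list js: the triple of running maxes equals
-- three independent folds over the per-color filtered value lists.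
theorem pv_inner (color : List String) (getv : Int → Int) (js : List Int) (st : Int × Int × Int) :
    js.foldl (fun (st : Int × Int × Int) j =>
      if PySem.List.pyGetD color j "" = "red" then (max st.1 (getv j), st.2.1, st.2.2)
      else if PySem.List.pyGetD color j "" = "green" then (st.1, max st.2.1 (getv j), st.2.2)
      else if PySem.List.pyGetD color j "" = "blue" then (st.1, st.2.1, max st.2.2 (getv j))
      else st) st =
    ((js.filterMap (fun j => if PySem.List.pyGetD color j "" = "red" then some (getv j) else none)).foldl max st.1,
     (js.filterMap (fun j => if PySem.List.pyGetD color j "" = "green" then some (getv j) else none)).foldl max st.2.1,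
     (js.filterMap (fun j => if PySem.List.pyGetD color j "" = "blue" then some (getv j) else none)).foldl max st.2.2) := by
  induction js generalizing st with
  | nil => simp
  | cons j js ih =>
    simp only [List.foldl_cons, List.filterMap_cons]
    by_cases h1 : PySem.List.pyGetD color j "" = "red"
    · simp only [h1]; simp; rw [ih]
    · by_cases h2 : PySem.List.pyGetD color j "" = "green"
      · simp only [h2]; simp; rw [ih]
      · by_cases h3 : PySem.List.pyGetD color j "" = "blue"
        · simp only [h3]; simp; rw [ih]
        · rw [if_neg h1, if_neg h2, if_neg h3, if_neg h1, if_neg h2, if_neg h3, ih]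

-- The whole of A's double loop equals three independent folds over the pvVals lists.
theorem pv_outer (numbers_list : List (List Int)) (ps : List (Int × List String)) (st : Int × Int × Int) :
    ps.foldl (fun (st : Int × Int × Int) p =>
      (PySem.List.pyRange 0 (p.2.length : Int) 1).foldl (fun (st : Int × Int × Int) j =>
        if PySem.List.pyGetD p.2 j "" = "red" then
          (max st.1 (PySem.List.pyGetD (PySem.List.pyGetD numbers_list p.1 []) j 0), st.2.1, st.2.2)
        else if PySem.List.pyGetD p.2 j "" = "green" then
          (st.1, max st.2.1 (PySem.List.pyGetD (PySem.List.pyGetD numbers_list p.1 []) j 0), st.2.2)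
        else if PySem.List.pyGetD p.2 j "" = "blue" then
          (st.1, st.2.1, max st.2.2 (PySem.List.pyGetD (PySem.List.pyGetD numbers_list p.1 []) j 0))
        else st) st) st =
    ((ps.flatMap (fun p => (PySem.List.pyRange 0 (p.2.length : Int) 1).filterMap (fun j =>
        if PySem.List.pyGetD p.2 j "" = "red" then some (PySem.List.pyGetD (PySem.List.pyGetD numbers_list p.1 []) j 0) else none))).foldl max st.1,
     (ps.flatMap (fun p => (PySem.List.pyRange 0 (p.2.length : Int) 1).filterMap (fun j =>
        if PySem.List.pyGetD p.2 j "" = "green" then some (PySem.List.pyGetD (PySem.List.pyGetD numbers_list p.1 []) j 0) else none))).foldl max st.2.1,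
     (ps.flatMap (fun p => (PySem.List.pyRange 0 (p.2.length : Int) 1).filterMap (fun j =>
        if PySem.List.pyGetD p.2 j "" = "blue" then some (PySem.List.pyGetD (PySem.List.pyGetD numbers_list p.1 []) j 0) else none))).foldl max st.2.2) := by
  induction ps generalizing st with
  | nil => simp
  | cons p ps ih =>
    simp only [List.foldl_cons, List.flatMap_cons, List.foldl_append]
    rw [pv_inner p.2 (fun j => PySem.List.pyGetD (PySem.List.pyGetD numbers_list p.1 []) j 0), ih]

-- Source B's max([0] + vals) is the running-max fold with initial value 0.
theorem pv_best (vals : List Int) :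
    (PySem.List.max? ((0 : Int) :: vals) (fun y => y)).getD 0 = vals.foldl max 0 := by
  rw [PySem.List.max?_id_cons]; rfl

-- ===== VERDICT (by name: the statement is the Claim_ definition above) =====
theorem find_min_values_spec : Claim_equal_find_min_values := by
  intro colors_list numbers_list _ _
  unfold Spec_find_min_values find_min_values find_min_values_alt
  simp only [pv_best, pv_outer, pvVals]
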